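-- pv_equiv track=rewrite | github.com/mic0ud/Leetcode-py3 | src/1208.get-equal-substrings-within-budget.py | equalSubstring_SLOW
-- ===== SOURCE A (Python) =====
-- from bisect import bisect_left, bisect_right
--
-- def equalSubstring_SLOW(s: str, t: str, maxCost: int) -> int:
--     costsPresum, preSum, res = [0], 0, 0
--     for i in range(len(s)):
--         preSum += abs(ord(s[i])-ord(t[i]))
--         costsPresum.append(preSum)
--     for i in range(len(costsPresum)-1,0,-1):
--         l = bisect_left(costsPresum, costsPresum[i]-maxCost)
--         # r = bisect_right(costsPresum, costsPresum[i]-maxCost)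
--         res = max(res, i-l)
--     return res
-- ===== SOURCE B (Python) =====
-- def equalSubstring_SLOW(s: str, t: str, maxCost: int) -> int:
--     left = 0
--     cost = 0
--     res = 0
--     for right in range(len(s)):
--         cost += abs(ord(s[right]) - ord(t[right]))
--         while left <= right and cost > maxCost:
--             cost -= abs(ord(s[left]) - ord(t[left]))
--             left += 1
--         res = max(res, right - left + 1)
--     return res
-- ===== Notes on version B (the rewrite author's own statement) =====
-- stated objective: faster
-- what changed: Replaced the prefix-sum array plus per-index binary search (bisect_left) with a single two-pointer sliding window that maintains the running window cost.
import Mathlib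
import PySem

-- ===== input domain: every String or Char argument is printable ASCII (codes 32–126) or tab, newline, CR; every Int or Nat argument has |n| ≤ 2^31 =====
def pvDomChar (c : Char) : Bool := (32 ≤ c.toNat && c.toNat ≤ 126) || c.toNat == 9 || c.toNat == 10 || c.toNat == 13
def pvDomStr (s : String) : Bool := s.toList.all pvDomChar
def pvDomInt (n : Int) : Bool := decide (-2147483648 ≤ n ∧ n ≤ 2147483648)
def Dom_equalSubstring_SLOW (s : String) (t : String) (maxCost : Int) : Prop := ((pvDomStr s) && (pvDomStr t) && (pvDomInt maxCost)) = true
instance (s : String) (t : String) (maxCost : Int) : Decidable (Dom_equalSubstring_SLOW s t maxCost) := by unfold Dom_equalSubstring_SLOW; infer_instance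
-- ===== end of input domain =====

-- B replaces A's prefix-sum array + per-index binary search by a two-pointer sliding window
-- maintaining the running window cost (objective: faster, O(n) instead of O(n log n)).

-- ===== PORT A =====
-- abs(ord(s[i]) - ord(t[i])); exact whenever i is in range of both strings (guaranteed by Pre_)
def pvAbsDiff (cs ct : List Char) (i : Nat) : Int :=
  |((cs.getD i ' ').toNat : Int) - ((ct.getD i ' ').toNat : Int)|

-- hand port of Python's bisect.bisect_left(a, x, lo, hi); exact: mid is always in range
def pvBisectLeft (a : List Int) (x : Int) (lo hi : Nat) : Nat :=
  if lo < hi then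
    let mid := (lo + hi) / 2
    if a.getD mid 0 < x then pvBisectLeft a x (mid + 1) hi
    else pvBisectLeft a x lo mid
  else lo
termination_by hi - lo
decreasing_by all_goals omega

-- body of A's first loop (appends the running prefix sum)
def pvStepA (cs ct : List Char) (st : List Int × Int) (i : Nat) : List Int × Int :=
  let preSum := st.2 + pvAbsDiff cs ct i
  (st.1 ++ [preSum], preSum)

def equalSubstring_SLOW (s : String) (t : String) (maxCost : Int) : Int :=
  let cs := s.toList
  let ct := t.toList
  let st := (List.range cs.length).foldl (pvStepA cs ct) ([0], 0)
  let costsPresum := st.1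
  (PySem.List.pyRange ((costsPresum.length : Int) - 1) 0 (-1)).foldl
    (fun res i =>
      let l := pvBisectLeft costsPresum (costsPresum.getD i.toNat 0 - maxCost) 0 costsPresum.length
      max res (i - (l : Int)))
    0

-- ===== PORT B =====
-- Source B's inner while loop: shrink the window from the left while the cost exceeds the budget
def pvAltWhile (cs ct : List Char) (maxCost : Int) (right left : Nat) (cost : Int) : Nat × Int :=
  if left ≤ right ∧ maxCost < cost then
    pvAltWhile cs ct maxCost right (left + 1) (cost - pvAbsDiff cs ct left)
  else (left, cost)
termination_by right + 1 - left
decreasing_by omega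

-- body of Source B's for loop; state = (left, cost, res)
def pvStepB (cs ct : List Char) (maxCost : Int) (st : Nat × Int × Int) (right : Nat) : Nat × Int × Int :=
  let cost := st.2.1 + pvAbsDiff cs ct right
  let lc := pvAltWhile cs ct maxCost right st.1 cost
  (lc.1, lc.2, max st.2.2 ((right : Int) - (lc.1 : Int) + 1))

def equalSubstring_SLOW_alt (s : String) (t : String) (maxCost : Int) : Int :=
  let cs := s.toList
  let ct := t.toList
  ((List.range cs.length).foldl (pvStepB cs ct maxCost) (0, 0, 0)).2.2

-- ===== PRECONDITION & SPEC =====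
-- Pre_ excludes exactly the inputs where the Python A raises IndexError (t shorter than s);
-- B raises there too.
def Pre_equalSubstring_SLOW (s : String) (t : String) (maxCost : Int) : Prop :=
  s.toList.length ≤ t.toList.length

instance (s : String) (t : String) (maxCost : Int) : Decidable (Pre_equalSubstring_SLOW s t maxCost) := by
  unfold Pre_equalSubstring_SLOW; infer_instance

def pvWitness_equalSubstring_SLOW : String × String × Int := ("ab", "bd", 1)

def Spec_equalSubstring_SLOW (s : String) (t : String) (maxCost : Int) (out : Int) : Prop := out = equalSubstring_SLOW_alt s t maxCost
instance (s : String) (t : String) (maxCost : Int) (out : Int) : Decidable (Spec_equalSubstring_SLOW s t maxCost out) := by unfold Spec_equalSubstring_SLOW; infer_instance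

-- ===== CLAIM (what is proved, stated in full; the proofs are below) =====
def Claim_equal_equalSubstring_SLOW : Prop := ∀ (s : String) (t : String) (maxCost : Int), Dom_equalSubstring_SLOW s t maxCost → Pre_equalSubstring_SLOW s t maxCost → Spec_equalSubstring_SLOW s t maxCost (equalSubstring_SLOW s t maxCost)

-- ===== LEMMAS AND PROOFS =====


def pvP (cs ct : List Char) : Nat → Int
  | 0 => 0
  | k + 1 => pvP cs ct k + pvAbsDiff cs ct k

theorem pvAbsDiff_nonneg (cs ct : List Char) (i : Nat) : 0 ≤ pvAbsDiff cs ct i := abs_nonneg _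

theorem pvP_mono (cs ct : List Char) {i j : Nat} (h : i ≤ j) : pvP cs ct i ≤ pvP cs ct j := by
  induction j with
  | zero => simp at h; simp [h]
  | succ k ih =>
    rcases Nat.lt_or_ge i (k+1) with hk | hk
    · exact le_trans (ih (Nat.lt_succ_iff.mp hk)) (by rw [pvP]; linarith [pvAbsDiff_nonneg cs ct k])
    · have : i = k + 1 := le_antisymm h hk
      rw [this]

def pvList (cs ct : List Char) : List Int := (List.range (cs.length + 1)).map (pvP cs ct)

theorem pvList_getD (cs ct : List Char) {k : Nat} (h : k ≤ cs.length) :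
    (pvList cs ct).getD k 0 = pvP cs ct k := by
  unfold pvList
  rw [List.getD_eq_getElem?_getD, List.getElem?_map, List.getElem?_range (by omega)]
  rfl

theorem pvList_sorted (cs ct : List Char) : (pvList cs ct).Pairwise (· ≤ ·) := by
  unfold pvList
  rw [List.pairwise_map]
  exact List.pairwise_lt_range.imp (fun hab => pvP_mono cs ct (le_of_lt hab))

theorem sorted_getD_mono {a : List Int} (hs : a.Pairwise (· ≤ ·)) {i j : Nat}
    (hij : i ≤ j) (hj : j < a.length) : a.getD i 0 ≤ a.getD j 0 := by
  rcases Nat.eq_or_lt_of_le hij with rfl | hlt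
  · exact le_refl _
  · have hi : i < a.length := lt_trans hlt hj
    rw [List.getD_eq_getElem _ _ hi, List.getD_eq_getElem _ _ hj]
    exact List.pairwise_iff_getElem.mp hs i j hi hj hlt

theorem countP_char1 {a : List Int} {x : Int} (hs : a.Pairwise (· ≤ ·)) :
    ∀ i, i < a.countP (fun y => decide (y < x)) → a.getD i 0 < x := by
  induction a with
  | nil => simp
  | cons h tl ih =>
    have hs' := (List.pairwise_cons.mp hs)
    intro i hi
    rw [List.countP_cons] at hi
    by_cases hh : h < x
    · cases i with
      | zero => simpa using hh
      | succ j =>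
        simp only [List.getD_cons_succ]
        exact ih hs'.2 j (by simp [hh] at hi; omega)
    · exfalso
      have hcz : tl.countP (fun y => decide (y < x)) = 0 := by
        rw [List.countP_eq_zero]
        intro y hy
        simp only [decide_eq_true_eq]
        exact fun hc => hh (lt_of_le_of_lt (hs'.1 y hy) hc)
      simp [hh, hcz] at hi

theorem countP_char2 {a : List Int} {x : Int} (hs : a.Pairwise (· ≤ ·)) :
    ∀ i, a.countP (fun y => decide (y < x)) ≤ i → i < a.length → ¬ a.getD i 0 < x := by
  induction a with
  | nil => simp
  | cons h tl ih =>
    have hs' := (List.pairwise_cons.mp hs)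
    intro i hi hlen
    rw [List.countP_cons] at hi
    by_cases hh : h < x
    · simp [hh] at hi
      cases i with
      | zero => omega
      | succ j =>
        simp only [List.getD_cons_succ]
        exact ih hs'.2 j (by omega) (by simpa using hlen)
    · cases i with
      | zero => simpa using hh
      | succ j =>
        simp only [List.getD_cons_succ]
        have hcz : tl.countP (fun y => decide (y < x)) = 0 := by
          rw [List.countP_eq_zero]
          intro y hy
          simp only [decide_eq_true_eq]
          exact fun hc => hh (lt_of_le_of_lt (hs'.1 y hy) hc)
        exact ih hs'.2 j (by omega) (by simpa using hlen)


theorem bisect_eq {a : List Int} {x : Int} (hs : a.Pairwise (· ≤ ·)) :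
    ∀ lo hi, lo ≤ hi → hi ≤ a.length →
      (∀ i, i < lo → a.getD i 0 < x) →
      (∀ i, hi ≤ i → i < a.length → ¬ a.getD i 0 < x) →
      pvBisectLeft a x lo hi = a.countP (fun y => decide (y < x)) := by
  intro lo hi
  fun_induction pvBisectLeft a x lo hi with
  | case1 lo hi hlt mid hmid ih =>
    intro _ hhi hinv1 hinv2
    apply ih (by omega) hhi
    · intro i hi2
      rcases Nat.lt_or_ge i lo with h | h
      · exact hinv1 i h
      · exact lt_of_le_of_lt (sorted_getD_mono hs (Nat.lt_succ_iff.mp hi2) (by omega)) hmid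
    · exact hinv2
  | case2 lo hi hlt mid hmid ih =>
    intro hlo hhi hinv1 hinv2
    apply ih (by omega) (by omega) hinv1
    · intro i hge hilen
      intro hc
      exact hmid (lt_of_le_of_lt (sorted_getD_mono hs hge hilen) hc)
  | case3 lo hi hge =>
    intro hlo hhi hinv1 hinv2
    have hle : a.countP (fun y => decide (y < x)) ≤ a.length := List.countP_le_length
    rcases Nat.lt_trichotomy lo (a.countP (fun y => decide (y < x))) with h | h | h
    · exact absurd (countP_char1 hs lo h) (hinv2 lo (by omega) (by omega))
    · exact h
    · exact absurd (hinv1 _ h) (countP_char2 hs _ (le_refl _) (by omega))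


theorem foldA_eq (cs ct : List Char) :
    ∀ m : Nat, (List.range m).foldl (pvStepA cs ct) ([0], 0)
      = ((List.range (m + 1)).map (pvP cs ct), pvP cs ct m) := by
  intro m
  induction m with
  | zero => simp [pvP]
  | succ k ih =>
    rw [List.range_succ, List.foldl_append, ih]
    simp [pvStepA, List.range_succ, pvP]

def pvC (cs ct : List Char) (x : Int) : Nat := (pvList cs ct).countP (fun y => decide (y < x))

def pvBest (cs ct : List Char) (maxCost : Int) : Nat → Int
  | 0 => 0
  | k + 1 => max (pvBest cs ct maxCost k)
      (((k : Int) + 1) - (pvC cs ct (pvP cs ct (k + 1) - maxCost) : Int))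

theorem pvBest_nonneg (cs ct : List Char) (maxCost : Int) (m : Nat) :
    0 ≤ pvBest cs ct maxCost m := by
  induction m with
  | zero => simp [pvBest]
  | succ k ih => rw [pvBest]; exact le_trans ih (le_max_left _ _)

theorem pvC_mono (cs ct : List Char) {x y : Int} (h : x ≤ y) : pvC cs ct x ≤ pvC cs ct y := by
  unfold pvC
  apply List.countP_mono_left
  intro b _
  simp only [decide_eq_true_eq]
  omega


theorem pvC_iff (cs ct : List Char) {l : Nat} (hl : l ≤ cs.length) (x : Int) :
    pvP cs ct l < x ↔ l < pvC cs ct x := by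
  constructor
  · intro h
    by_contra hc
    have hc' : pvC cs ct x ≤ l := by omega
    have hlen : l < (pvList cs ct).length := by simp [pvList]; omega
    exact countP_char2 (pvList_sorted cs ct) l hc' hlen (by rwa [pvList_getD cs ct hl])
  · intro h
    have := countP_char1 (pvList_sorted cs ct) l h
    rwa [pvList_getD cs ct hl] at this


theorem while_eq (cs ct : List Char) (maxCost : Int) (r : Nat) (hr : r < cs.length) :
    ∀ left : Nat, left ≤ r + 1 → left ≤ pvC cs ct (pvP cs ct (r + 1) - maxCost) →
      pvAltWhile cs ct maxCost r left (pvP cs ct (r + 1) - pvP cs ct left)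
        = (min (r + 1) (pvC cs ct (pvP cs ct (r + 1) - maxCost)),
           pvP cs ct (r + 1) - pvP cs ct (min (r + 1) (pvC cs ct (pvP cs ct (r + 1) - maxCost)))) := by
  suffices h : ∀ (k left : Nat), r + 1 - left ≤ k → left ≤ r + 1 →
      left ≤ pvC cs ct (pvP cs ct (r + 1) - maxCost) →
      pvAltWhile cs ct maxCost r left (pvP cs ct (r + 1) - pvP cs ct left)
        = (min (r + 1) (pvC cs ct (pvP cs ct (r + 1) - maxCost)),
           pvP cs ct (r + 1) - pvP cs ct (min (r + 1) (pvC cs ct (pvP cs ct (r + 1) - maxCost)))) by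
    intro left h1 h2
    exact h (r + 1 - left) left le_rfl h1 h2
  intro k
  induction k with
  | zero =>
    intro left hk h1 h2
    have hl : left = r + 1 := by omega
    subst hl
    rw [pvAltWhile]
    have hmin : min (r + 1) (pvC cs ct (pvP cs ct (r + 1) - maxCost)) = r + 1 := by omega
    simp [hmin]
  | succ k ih =>
    intro left hk h1 h2
    rw [pvAltWhile]
    by_cases hcond : left ≤ r ∧ maxCost < pvP cs ct (r + 1) - pvP cs ct left
    · rw [if_pos hcond]
      have hlt : left < pvC cs ct (pvP cs ct (r + 1) - maxCost) :=
        (pvC_iff cs ct (by omega) _).mp (by omega)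
      have hstep : pvP cs ct (r + 1) - pvP cs ct left - pvAbsDiff cs ct left
          = pvP cs ct (r + 1) - pvP cs ct (left + 1) := by
        have hP : pvP cs ct (left + 1) = pvP cs ct left + pvAbsDiff cs ct left := rfl
        rw [hP]; ring
      rw [hstep]
      exact ih (left + 1) (by omega) (by omega) hlt
    · rw [if_neg hcond]
      have hmin : left = min (r + 1) (pvC cs ct (pvP cs ct (r + 1) - maxCost)) := by
        rcases Nat.eq_or_lt_of_le h1 with he | hlt
        · omega
        · have hle : left ≤ r := by omega
          have : ¬ maxCost < pvP cs ct (r + 1) - pvP cs ct left := fun hc => hcond ⟨hle, hc⟩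
          have hnc : ¬ left < pvC cs ct (pvP cs ct (r + 1) - maxCost) := fun hc =>
            this (by have := (pvC_iff cs ct (show left ≤ cs.length by omega) (pvP cs ct (r + 1) - maxCost)).mpr hc; omega)
          omega
      rw [← hmin]



theorem foldB_eq (cs ct : List Char) (maxCost : Int) :
    ∀ m : Nat, m ≤ cs.length →
      (List.range m).foldl (pvStepB cs ct maxCost) (0, 0, 0)
        = (min m (pvC cs ct (pvP cs ct m - maxCost)),
           pvP cs ct m - pvP cs ct (min m (pvC cs ct (pvP cs ct m - maxCost))),
           pvBest cs ct maxCost m) := by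
  intro m
  induction m with
  | zero => intro _; simp [pvP, pvBest]
  | succ k ih =>
    intro hk
    rw [List.range_succ, List.foldl_append, ih (by omega)]
    simp only [List.foldl_cons, List.foldl_nil]
    unfold pvStepB
    set C := pvC cs ct (pvP cs ct (k + 1) - maxCost) with hC
    set Ck := pvC cs ct (pvP cs ct k - maxCost) with hCk
    have hCC : Ck ≤ C := pvC_mono cs ct (by
      have : pvP cs ct k ≤ pvP cs ct (k + 1) := pvP_mono cs ct (by omega)
      omega)
    have hleft : min k Ck ≤ k + 1 := by omega
    have hcost : pvP cs ct k - pvP cs ct (min k Ck) + pvAbsDiff cs ct k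
        = pvP cs ct (k + 1) - pvP cs ct (min k Ck) := by
      have hP : pvP cs ct (k + 1) = pvP cs ct k + pvAbsDiff cs ct k := rfl
      rw [hP]; ring
    simp only []
    rw [hcost]
    rw [while_eq cs ct maxCost k (by omega) (min k Ck) (by omega) (by omega)]
    simp only []
    have hb := pvBest_nonneg cs ct maxCost k
    have hrw : pvBest cs ct maxCost (k + 1)
        = max (pvBest cs ct maxCost k) (((k : Int) + 1) - (C : Int)) := rfl
    rw [hrw]
    rcases Nat.lt_or_ge (k + 1) C with hgt | h
    · rw [Nat.min_eq_left (by omega)]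
      congr 1
      have hC1 : ((k + 1 : Nat) : Int) ≤ (C : Int) := by exact_mod_cast Nat.le_of_lt hgt
      rw [max_eq_left (by push_cast at hC1 ⊢; omega), max_eq_left (by push_cast at hC1 ⊢; omega)]
    · rw [Nat.min_eq_right h]
      have harg : (k : Int) - (C : Int) + 1 = (k : Int) + 1 - (C : Int) := by ring
      rw [harg]

theorem foldl_max_out (g : Int → Int) (l : List Int) :
    ∀ acc c : Int, max (l.foldl (fun r i => max r (g i)) acc) c
      = l.foldl (fun r i => max r (g i)) (max acc c) := by
  induction l with
  | nil => intro acc c; rfl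
  | cons a l ih =>
    intro acc c
    simp only [List.foldl_cons]
    rw [ih (max acc (g a)) c, max_right_comm]

theorem foldl_max_reverse (g : Int → Int) (l : List Int) :
    ∀ acc : Int, l.reverse.foldl (fun r i => max r (g i)) acc
      = l.foldl (fun r i => max r (g i)) acc := by
  induction l with
  | nil => intro acc; rfl
  | cons a l ih =>
    intro acc
    rw [List.reverse_cons, List.foldl_append, ih]
    simp only [List.foldl_cons, List.foldl_nil]
    rw [foldl_max_out]

theorem foldA2_eq (cs ct : List Char) (maxCost : Int) :
    (PySem.List.pyRange (((pvList cs ct).length : Int) - 1) 0 (-1)).foldl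
      (fun res i =>
        let l := pvBisectLeft (pvList cs ct) ((pvList cs ct).getD i.toNat 0 - maxCost) 0 (pvList cs ct).length
        max res (i - (l : Int))) 0
    = pvBest cs ct maxCost cs.length := by
  have hlen : ((pvList cs ct).length : Int) - 1 = (cs.length : Int) := by
    simp [pvList]
  rw [hlen, PySem.List.pyRange_neg_one_eq_reverse]
  rw [foldl_max_reverse (fun i => i - (pvBisectLeft (pvList cs ct) ((pvList cs ct).getD i.toNat 0 - maxCost) 0 (pvList cs ct).length : Int))]
  rw [show (0 : Int) + 1 = 1 from rfl]
  rw [PySem.List.pyRange_one]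
  rw [List.foldl_map]
  have hn : (((cs.length : Int) + 1 - 1)).toNat = cs.length := by omega
  rw [hn]
  suffices h : ∀ m : Nat, m ≤ cs.length →
      (List.range m).foldl (fun res (k : Nat) =>
        max res ((1 + (k : Int)) - (pvBisectLeft (pvList cs ct) ((pvList cs ct).getD (1 + (k : Int)).toNat 0 - maxCost) 0 (pvList cs ct).length : Int))) 0
      = pvBest cs ct maxCost m by
    exact h cs.length le_rfl
  intro m
  induction m with
  | zero => intro _; rfl
  | succ k ih =>
    intro hk
    rw [List.range_succ, List.foldl_append, ih (by omega)]
    simp only [List.foldl_cons, List.foldl_nil]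
    have ht : ((1 : Int) + (k : Nat)).toNat = k + 1 := by omega
    rw [ht, pvList_getD cs ct (by omega : k + 1 ≤ cs.length)]
    rw [bisect_eq (pvList_sorted cs ct) 0 (pvList cs ct).length (Nat.zero_le _) le_rfl
      (by intro i hi; omega) (by intro i h1 h2; omega)]
    have hB : pvBest cs ct maxCost (k + 1)
        = max (pvBest cs ct maxCost k) (((k : Int) + 1) - (pvC cs ct (pvP cs ct (k + 1) - maxCost) : Int)) := rfl
    rw [hB]
    congr 2
    ring

-- ===== VERDICT (by name: the statement is the Claim_ definition above) =====
theorem equalSubstring_SLOW_spec : Claim_equal_equalSubstring_SLOW := by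
  intro s t maxCost _ _
  unfold Spec_equalSubstring_SLOW equalSubstring_SLOW equalSubstring_SLOW_alt
  dsimp only
  rw [foldA_eq, foldB_eq s.toList t.toList maxCost s.toList.length le_rfl]
  dsimp only
  have h2 := foldA2_eq s.toList t.toList maxCost
  unfold pvList at h2
  rw [h2]
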